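-- pv_equiv track=rewrite | github.com/IoBT-VISTEC/ApSense | model/runner.py | ends
-- ===== SOURCE A (Python) =====
-- def ends(seq):
--     curr = 0
--     for item in seq:
--         if item != 0:
--             curr = 1
--         else:  # reverts from 1 to 0
--             if curr == 1:
--                 return 1
--     return 0
-- ===== SOURCE B (Python) =====
-- def ends(seq):
--     lst = list(seq)
--     if 0 in lst:
--         j = len(lst) - 1 - lst[::-1].index(0)  # position of the last zero
--         return int(any(lst[:j]))               # any nonzero strictly before it
--     return 0
-- ===== Notes on version B (the rewrite author's own statement) =====
-- stated objective: alternative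
-- what changed: Instead of A's forward flag-carrying scan that returns at the first zero following a nonzero, B locates the LAST zero (via reversed-list index) and answers by whether any nonzero element precedes that position; no loop state is kept.
import Mathlib
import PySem

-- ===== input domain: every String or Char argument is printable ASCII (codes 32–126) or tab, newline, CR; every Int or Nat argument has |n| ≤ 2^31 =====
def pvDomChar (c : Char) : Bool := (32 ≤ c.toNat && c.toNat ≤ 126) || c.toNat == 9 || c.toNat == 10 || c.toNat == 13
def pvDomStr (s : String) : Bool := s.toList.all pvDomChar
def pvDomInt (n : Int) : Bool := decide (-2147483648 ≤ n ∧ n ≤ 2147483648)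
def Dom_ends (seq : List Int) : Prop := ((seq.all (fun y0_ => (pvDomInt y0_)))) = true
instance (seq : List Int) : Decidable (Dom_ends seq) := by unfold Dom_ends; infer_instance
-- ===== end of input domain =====

-- B replaces A's forward flag loop by locating the LAST zero via a reversed-list index and checking for a nonzero before it (alternative decomposition, same cost).


-- ===== PORT A =====
-- flag loop with early return, transliterated: curr is the loop state
def endsLoop : List Int → Int → Int
  | [], _ => 0
  | x :: xs, curr =>
    if x ≠ 0 then endsLoop xs 1
    else if curr == 1 then 1 else endsLoop xs curr

def ends (seq : List Int) : Int := endsLoop seq 0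

-- ===== PORT B =====
-- if 0 in lst: j = len-1-lst[::-1].index(0); return int(any(lst[:j])); else 0
def ends_alt (seq : List Int) : Int :=
  if seq.contains 0 then
    match PySem.List.index? seq.reverse 0 with
    | some k =>
        if (PySem.List.slice seq none (some ((seq.length : Int) - 1 - (k : Int)))).any
             (fun x => decide (x ≠ 0)) then 1 else 0
    | none => 0  -- unreachable: 0 ∈ seq, so .index(0) on the reverse succeeds
  else 0

-- ===== PRECONDITION & SPEC =====
def Spec_ends (seq : List Int) (out : Int) : Prop := out = ends_alt seq
instance (seq : List Int) (out : Int) : Decidable (Spec_ends seq out) := by unfold Spec_ends; infer_instance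

-- ===== CLAIM (what is proved, stated in full; the proofs are below) =====
def Claim_equal_ends : Prop := ∀ (seq : List Int), Dom_ends seq → Spec_ends seq (ends seq)

-- ===== LEMMAS AND PROOFS =====

-- once the flag is set, A returns 1 exactly when a zero remains
theorem endsLoop_one (xs : List Int) : endsLoop xs 1 = if xs.contains 0 then 1 else 0 := by
  induction xs with
  | nil => simp [endsLoop]
  | cons x xs ih =>
    by_cases h : x = 0
    · simp [endsLoop, h]
    · simp [endsLoop, h, Ne.symm h, ih]

-- B skips a zero head
theorem ends_alt_zero_cons (xs : List Int) : ends_alt ((0 : Int) :: xs) = ends_alt xs := by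
  by_cases h0 : (0 : Int) ∈ xs
  · have hrev : (0 : Int) ∈ xs.reverse := by simpa using h0
    have hidx : PySem.List.index? (xs.reverse ++ [(0 : Int)]) 0 = PySem.List.index? xs.reverse 0 :=
      PySem.List.index?_append_of_mem _ hrev
    obtain ⟨k, hk⟩ := (PySem.List.index?_isSome_iff (xs := xs.reverse) (v := 0)).2 hrev
        |> Option.isSome_iff_exists.mp
    obtain ⟨hklt, -, -⟩ := PySem.List.getElem_of_index?_eq_some hk
    have hkl : k < xs.length := by simpa using hklt
    simp only [ends_alt, List.contains_cons, List.reverse_cons, hidx, hk]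
    have h1 : ((((0 : Int) :: xs).length : Int) - 1 - (k : Int)) = ((xs.length - k : ℕ) : Int) := by
      simp [List.length_cons]; omega
    have h2 : (((xs.length : Int)) - 1 - (k : Int)) = (((xs.length - 1 - k : ℕ)) : Int) := by
      omega
    rw [h1, h2, PySem.List.slice_to_natCast, PySem.List.slice_to_natCast]
    have htake : ((0 : Int) :: xs).take (xs.length - k) = 0 :: xs.take (xs.length - 1 - k) := by
      have : xs.length - k = (xs.length - 1 - k) + 1 := by omega
      simp [this, List.take_succ_cons]
    simp [htake, h0]
  · have hrev : (0 : Int) ∉ xs.reverse := by simpa using h0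
    have hidx : PySem.List.index? (xs.reverse ++ [(0 : Int)]) 0 = some xs.reverse.length :=
      PySem.List.index?_append_singleton_self xs.reverse 0 hrev
    simp only [ends_alt, List.contains_cons, List.reverse_cons, hidx]
    have h1 : ((((0 : Int) :: xs).length : Int) - 1 - ((xs.reverse.length : ℕ) : Int)) = ((0 : ℕ) : Int) := by
      simp
    rw [h1, PySem.List.slice_to_natCast]
    simp [h0]

-- B with a nonzero head answers by whether the tail holds a zero
theorem ends_alt_nonzero_cons (x : Int) (xs : List Int) (hx : x ≠ 0) :
    ends_alt (x :: xs) = if xs.contains 0 then 1 else 0 := by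
  by_cases h0 : (0 : Int) ∈ xs
  · have hrev : (0 : Int) ∈ xs.reverse := by simpa using h0
    have hidx : PySem.List.index? (xs.reverse ++ [x]) 0 = PySem.List.index? xs.reverse 0 :=
      PySem.List.index?_append_of_mem _ hrev
    obtain ⟨k, hk⟩ := (PySem.List.index?_isSome_iff (xs := xs.reverse) (v := 0)).2 hrev
        |> Option.isSome_iff_exists.mp
    obtain ⟨hklt, -, -⟩ := PySem.List.getElem_of_index?_eq_some hk
    have hkl : k < xs.length := by simpa using hklt
    simp only [ends_alt, List.contains_cons, List.reverse_cons, hidx, hk]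
    have h1 : (((x :: xs).length : Int) - 1 - (k : Int)) = ((xs.length - k : ℕ) : Int) := by
      simp [List.length_cons]; omega
    rw [h1, PySem.List.slice_to_natCast]
    have htake : (x :: xs).take (xs.length - k) = x :: xs.take (xs.length - 1 - k) := by
      have : xs.length - k = (xs.length - 1 - k) + 1 := by omega
      simp [this, List.take_succ_cons]
    simp [htake, hx, h0]
  · simp [ends_alt, Ne.symm hx, h0]

theorem ends_eq (seq : List Int) : endsLoop seq 0 = ends_alt seq := by
  induction seq with
  | nil => rfl
  | cons x xs ih =>
    by_cases h : x = 0
    · subst h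
      simpa [endsLoop, ends_alt_zero_cons] using ih
    · simp [endsLoop, h, endsLoop_one, ends_alt_nonzero_cons x xs h]

-- ===== VERDICT (by name: the statement is the Claim_ definition above) =====
theorem ends_spec : Claim_equal_ends := by
  intro seq _
  exact ends_eq seq
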